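-- pv_equiv track=rewrite | github.com/karthikpappu/pyc_source | pycfiles/config_enhance-1.2.2-py2.7/__init__.py | parse_ops_from_config_item
-- ===== SOURCE A (Python) =====
-- def parse_ops_from_config_item(value):
--     """Parse the <<= config item for enhancements."""
--     values = [ vv for vv in value.split() if vv ]
--     ops = []
--     next_is_section = False
--     last_op = None
--     for vv in values:
--         if next_is_section:
--             ops.append((last_op, vv))
--             next_is_section = False
--             last_op = None
--         elif len(vv) == 1:
--             last_op = vv
--             next_is_section = True
--         elif len(vv) > 1:
--             op, section = vv[0], vv[1:]
--             ops.append((vv[0], vv[1:]))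
--
--     return ops
-- ===== SOURCE B (Python) =====
-- def _fuse(toks):
--     """Normalize the token stream: glue each 1-char op onto its following
--     section token, so every surviving token is a single 'op+section' word.
--     A trailing 1-char op with no following token is dropped."""
--     if not toks:
--         return []
--     if len(toks[0]) == 1:
--         if len(toks) == 1:
--             return []
--         return [toks[0] + toks[1]] + _fuse(toks[2:])
--     return [toks[0]] + _fuse(toks[1:])
--
--
-- def parse_ops_from_config_item(value):
--     """Parse the <<= config item for enhancements."""
--     toks = [vv for vv in value.split() if vv]
--     return [(t[0], t[1:]) for t in _fuse(toks)]
-- ===== Notes on version B (the rewrite author's own statement) =====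
-- stated objective: simpler
-- what changed: Two-stage decomposition instead of A's flag-carrying fold: a recursive pass first normalizes the token stream by concatenating each single-char op with its following section token (dropping a trailing op), then one uniform comprehension splits every normalized token into (head, tail).
import Mathlib
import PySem

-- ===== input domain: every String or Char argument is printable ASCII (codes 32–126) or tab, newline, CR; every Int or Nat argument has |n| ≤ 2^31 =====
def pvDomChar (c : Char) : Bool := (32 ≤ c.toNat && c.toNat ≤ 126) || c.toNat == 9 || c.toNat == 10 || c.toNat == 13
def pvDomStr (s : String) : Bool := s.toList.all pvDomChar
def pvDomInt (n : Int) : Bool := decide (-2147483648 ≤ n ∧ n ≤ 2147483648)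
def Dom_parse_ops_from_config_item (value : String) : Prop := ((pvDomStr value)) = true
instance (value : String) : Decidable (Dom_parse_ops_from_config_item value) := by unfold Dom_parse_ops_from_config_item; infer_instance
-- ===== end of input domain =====

-- B replaces A's flag-carrying state machine by two stages: a recursive pass fusing each
-- 1-char op with its following token, then a uniform map splitting every fused token;
-- objective: simpler. Same return value.

-- ===== PORT A =====
-- A's loop state: (ops, last_op as Option String). In A, next_is_section is true exactly when
-- last_op has been set (the two are assigned together), so 'some op' encodes next_is_section = True.
def pvAStep (st : List (String × String) × Option String) (vv : String) :
    List (String × String) × Option String :=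
  match st with
  | (ops, some lastOp) => (ops ++ [(lastOp, vv)], none)
  | (ops, none) =>
    if PySem.Str.len vv = 1 then (ops, some vv)
    else if PySem.Str.len vv > 1 then
      -- op, section = vv[0], vv[1:]; ops.append((vv[0], vv[1:]))
      (ops ++ [(String.ofList (vv.toList.take 1), String.ofList (vv.toList.drop 1))], none)
    else (ops, none)

def parse_ops_from_config_item (value : String) : List (String × String) :=
  let values := (PySem.Str.split₀ value).filter (fun vv => vv ≠ "")
  (values.foldl pvAStep ([], none)).1

-- ===== PORT B =====
-- stage 1 (_fuse): glue each 1-char op onto its following token, drop a trailing lone op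
def pvFuse : List String → List String
  | [] => []
  | t :: rest =>
    if PySem.Str.len t = 1 then
      match rest with
      | [] => []
      | s :: rest' => (t ++ s) :: pvFuse rest'
    else t :: pvFuse rest

-- stage 2: the comprehension (t[0], t[1:]) over the fused tokens
def pvSplit1 (t : String) : String × String :=
  (String.ofList (t.toList.take 1), String.ofList (t.toList.drop 1))

def parse_ops_from_config_item_alt (value : String) : List (String × String) :=
  let toks := (PySem.Str.split₀ value).filter (fun vv => vv ≠ "")
  (pvFuse toks).map pvSplit1

-- ===== PRECONDITION & SPEC =====
def Spec_parse_ops_from_config_item (value : String) (out : List (String × String)) : Prop := out = parse_ops_from_config_item_alt value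
instance (value : String) (out : List (String × String)) : Decidable (Spec_parse_ops_from_config_item value out) := by unfold Spec_parse_ops_from_config_item; infer_instance

-- ===== CLAIM (what is proved, stated in full; the proofs are below) =====
def Claim_equal_parse_ops_from_config_item : Prop := ∀ (value : String), Dom_parse_ops_from_config_item value → Spec_parse_ops_from_config_item value (parse_ops_from_config_item value)

-- ===== LEMMAS AND PROOFS =====

-- The fused tokens still to be produced from A's mid-loop state.
def pvContF : Option String → List String → List String
  | none, ts => pvFuse ts
  | some _, [] => []
  | some op, v :: r => (op ++ v) :: pvFuse r

theorem pvFuse_cons_ne (t : String) (rest : List String) (h : ¬ t.length = 1) :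
    pvFuse (t :: rest) = t :: pvFuse rest := by
  cases rest <;> simp [pvFuse, h]

theorem pvSplit1_fused (op v : String) (h : op.length = 1) :
    pvSplit1 (op ++ v) = (op, v) := by
  obtain ⟨c, hc⟩ : ∃ c, op.toList = [c] := by
    cases hl : op.toList with
    | nil => exfalso; have := op.length_toList; rw [hl] at this; simp at this; omega
    | cons c tl =>
      cases tl with
      | nil => exact ⟨c, rfl⟩
      | cons d tl' => exfalso; have := op.length_toList; rw [hl] at this; simp at this; omega
  simp [pvSplit1, String.toList_append, hc]
  exact String.toList_injective (by simp [hc])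

theorem pvFold_eq_cont (ts : List String) (hne : ∀ t ∈ ts, t ≠ "")
    (acc : List (String × String)) (st : Option String)
    (hst : ∀ op, st = some op → op.length = 1) :
    (ts.foldl pvAStep (acc, st)).1 = acc ++ (pvContF st ts).map pvSplit1 := by
  induction ts generalizing acc st with
  | nil => cases st <;> simp [pvContF, pvFuse]
  | cons t rest ih =>
    have hrest : ∀ u ∈ rest, u ≠ "" := fun u hu => hne u (List.mem_cons_of_mem _ hu)
    have ht : t ≠ "" := hne t (List.mem_cons_self)
    have htl : t.toList ≠ [] := fun hn => ht (String.toList_injective (by simp [hn]))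
    have hpos : 0 < t.length := by
      have := Nat.pos_of_ne_zero (fun h => htl (List.eq_nil_of_length_eq_zero h))
      simpa using this
    cases st with
    | some op =>
      have hop : op.length = 1 := hst op rfl
      simp only [List.foldl_cons, pvAStep]
      rw [ih hrest _ none (by simp)]
      simp [pvContF, pvSplit1_fused op t hop]
    | none =>
      simp only [List.foldl_cons]
      by_cases h1 : t.length = 1
      · rw [show pvAStep (acc, none) t = (acc, some t) from by simp [pvAStep, h1]]
        rw [ih hrest _ (some t) (by intro op hop; cases hop; exact h1)]
        cases rest with
        | nil => simp [pvContF, pvFuse, h1]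
        | cons v r => simp [pvContF, pvFuse, h1]
      · have hgt : 1 < t.length := lt_of_le_of_ne hpos (fun h => h1 h.symm)
        rw [show pvAStep (acc, none) t
            = (acc ++ [(String.ofList (t.toList.take 1), String.ofList (t.toList.drop 1))], none)
            from by simp [pvAStep, h1, hgt]]
        rw [ih hrest _ none (by simp)]
        simp [pvContF, pvFuse_cons_ne t rest h1, pvSplit1]

-- ===== VERDICT (by name: the statement is the Claim_ definition above) =====
theorem parse_ops_from_config_item_spec : Claim_equal_parse_ops_from_config_item := by
  intro value _
  unfold Spec_parse_ops_from_config_item parse_ops_from_config_item parse_ops_from_config_item_alt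
  have h := pvFold_eq_cont ((PySem.Str.split₀ value).filter (fun vv => vv ≠ ""))
    (fun t ht => (List.mem_filter.mp ht).2 |> of_decide_eq_true) [] none (by simp)
  simpa [pvContF] using h
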